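-- pv_equiv track=rewrite | github.com/dyna-sawada/taiwa_kukan | debate_score/set_scores.py | make_score_list
-- ===== SOURCE A (Python) =====
-- def make_score_list(Score, Order):
--     # 新たなリストに追加
--     # order = [G1立論,G1反論,G1再構築,G1再反論,G2立論,G2反論,O1立論,O1反論,O1再構築,O2立論,O2反論]
--     c = 0
--     for i in Order:
--         if i == 0:
--             Score.pop(c)
--             c += 0
--         else:
--             c += 1
--     return Score                # 変換されたスコアリスト
-- ===== SOURCE B (Python) =====
-- def make_score_list(Score, Order):
--     # Build the kept elements in one pass over the paired lists instead of
--     # mutating Score with pop(); elements of Score beyond len(Order) are kept.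
--     # (Return value only: unlike A, this does not mutate Score in place.)
--     kept = [s for s, o in zip(Score, Order) if o != 0]
--     return kept + Score[len(Order):]
-- ===== Notes on version B (the rewrite author's own statement) =====
-- stated objective: simpler
-- what changed: A repeatedly pops from Score in place while tracking a moving cursor; B builds the result in one pass as a comprehension over zip(Score, Order) plus the untouched tail Score[len(Order):] (return value only: B does not mutate Score).
import Mathlib
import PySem

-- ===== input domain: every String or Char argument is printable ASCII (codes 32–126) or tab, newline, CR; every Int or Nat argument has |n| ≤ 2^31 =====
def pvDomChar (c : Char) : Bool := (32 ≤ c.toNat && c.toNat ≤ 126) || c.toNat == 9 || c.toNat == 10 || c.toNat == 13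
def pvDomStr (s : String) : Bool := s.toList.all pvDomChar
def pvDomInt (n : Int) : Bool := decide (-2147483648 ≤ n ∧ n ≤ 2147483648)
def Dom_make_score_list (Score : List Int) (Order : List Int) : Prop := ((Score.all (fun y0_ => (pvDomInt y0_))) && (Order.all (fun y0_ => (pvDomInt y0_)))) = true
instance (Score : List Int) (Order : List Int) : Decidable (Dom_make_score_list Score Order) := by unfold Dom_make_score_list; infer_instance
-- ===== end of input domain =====

-- B replaces A's pop-with-moving-cursor loop by a single zip/filter pass plus the untouched
-- tail (return value only: A mutates Score in place, B does not).

-- ===== PORT A =====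
-- the for-loop: state is the (shrinking) Score list and the cursor c; Score.pop(c) is
-- PySem.List.pop? (none = IndexError, excluded by Pre_).
def pvALoop (score : List Int) (order : List Int) (c : Nat) : Option (List Int) :=
  match order with
  | [] => some score
  | i :: rest =>
    if i = 0 then
      match PySem.List.pop? score (c : Int) with
      | none => none
      | some (_, score') => pvALoop score' rest c
    else pvALoop score rest (c + 1)

def make_score_list (Score : List Int) (Order : List Int) : List Int :=
  (pvALoop Score Order 0).getD Score

-- ===== PORT B =====
def make_score_list_alt (Score : List Int) (Order : List Int) : List Int :=
  ((Score.zip Order).filterMap (fun p => if p.2 ≠ 0 then some p.1 else none))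
    ++ Score.drop Order.length

-- ===== PRECONDITION & SPEC =====
-- Pre_ excludes exactly the inputs where A raises IndexError: a zero in Order at an index ≥ len(Score).
def Pre_make_score_list (Score : List Int) (Order : List Int) : Prop :=
  ∀ x ∈ Order.drop Score.length, x ≠ 0
instance (Score : List Int) (Order : List Int) : Decidable (Pre_make_score_list Score Order) := by
  unfold Pre_make_score_list; infer_instance

def pvWitness_make_score_list : List Int × List Int := ([3, 7, 9], [1, 0, 2])

def Spec_make_score_list (Score : List Int) (Order : List Int) (out : List Int) : Prop :=
  out = make_score_list_alt Score Order
instance (Score : List Int) (Order : List Int) (out : List Int) : Decidable (Spec_make_score_list Score Order out) := by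
  unfold Spec_make_score_list; infer_instance

-- ===== CLAIM (what is proved, stated in full; the proofs are below) =====
def Claim_equal_make_score_list : Prop := ∀ (Score : List Int) (Order : List Int), Dom_make_score_list Score Order → Pre_make_score_list Score Order → Spec_make_score_list Score Order (make_score_list Score Order)


-- ===== LEMMAS AND PROOFS =====

/-- If every remaining instruction is nonzero, A's loop only advances the cursor. -/
lemma pvALoop_nonzero (order : List Int) (s : List Int) (c : Nat)
    (h : ∀ x ∈ order, x ≠ 0) : pvALoop s order c = some s := by
  induction order generalizing c with
  | nil => rfl
  | cons i rest ih =>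
    have hi : i ≠ 0 := h i (List.mem_cons_self)
    simp [pvALoop, hi, ih _ (fun x hx => h x (List.mem_cons_of_mem _ hx))]

/-- Loop invariant: the first `kept.length` elements are already decided, the cursor
    sits at `kept.length`, and the loop finishes the job on `rem`. -/
lemma pvALoop_eq (order kept rem : List Int)
    (h : ∀ x ∈ order.drop rem.length, x ≠ 0) :
    pvALoop (kept ++ rem) order kept.length =
      some (kept ++ ((rem.zip order).filterMap (fun p => if p.2 ≠ 0 then some p.1 else none))
        ++ rem.drop order.length) := by
  induction order generalizing kept rem with
  | nil => simp [pvALoop]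
  | cons i rest ih =>
    cases rem with
    | nil =>
      have hall : ∀ x ∈ (i :: rest), x ≠ 0 := by simpa using h
      simp only [List.append_nil]
      rw [pvALoop_nonzero _ _ _ hall]
      simp
    | cons r rs =>
      have h' : ∀ x ∈ rest.drop rs.length, x ≠ 0 := by
        intro x hx
        exact h x (by simpa using hx)
      by_cases hi : i = 0
      · subst hi
        have hlt : kept.length < (kept ++ r :: rs).length := by simp
        rw [show pvALoop (kept ++ r :: rs) (0 :: rest) kept.length
            = (match PySem.List.pop? (kept ++ r :: rs) (kept.length : Int) with
               | none => none
               | some (_, score') => pvALoop score' rest kept.length) from by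
          simp [pvALoop]]
        rw [PySem.List.pop?_natCast _ _ hlt]
        have he : (kept ++ r :: rs).eraseIdx kept.length = kept ++ rs := by
          rw [List.eraseIdx_append_of_length_le (le_refl _)]
          simp
        simp only [he]
        rw [ih kept rs h']
        simp
      · rw [show pvALoop (kept ++ r :: rs) (i :: rest) kept.length
            = pvALoop (kept ++ r :: rs) rest (kept.length + 1) from by simp [pvALoop, hi]]
        have h1 : kept ++ r :: rs = (kept ++ [r]) ++ rs := by simp
        have h2 : kept.length + 1 = (kept ++ [r]).length := by simp
        rw [h1, h2, ih (kept ++ [r]) rs h']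
        simp [hi]

-- ===== VERDICT (by name: the statement is the Claim_ definition above) =====
theorem make_score_list_spec : Claim_equal_make_score_list := by
  intro Score Order _ hpre
  unfold Spec_make_score_list make_score_list make_score_list_alt
  have := pvALoop_eq Order [] Score (by simpa using hpre)
  simp only [List.nil_append, List.length_nil] at this
  rw [this]
  simp
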